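-- pv_equiv track=rewrite | github.com/JengTallis/cipher | cipher.py | sort_str
-- ===== SOURCE A (Python) =====
-- def sort_str(s):
-- 	ss = []
-- 	for c in s:
-- 		ss.append(c)
-- 	ss.sort()
-- 	idx = []
-- 	for c in ss:
-- 		idx.append(s.index(c))
-- 	return idx
-- ===== SOURCE B (Python) =====
-- def sort_str(s):
-- 	chars = list(s)
-- 	out = []
-- 	while chars:
-- 		m = min(chars)
-- 		out += [s.index(m)] * chars.count(m)
-- 		chars = [c for c in chars if c != m]
-- 	return out
-- ===== Notes on version B (the rewrite author's own statement) =====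
-- stated objective: alternative
-- what changed: B drops the sort entirely: a selection loop repeatedly takes the minimum remaining character, emits s.index(min) repeated count-many times, and filters out all its copies, so the output is produced per distinct character (k loop iterations) instead of sorting all n characters and calling s.index once per character.
import Mathlib
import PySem

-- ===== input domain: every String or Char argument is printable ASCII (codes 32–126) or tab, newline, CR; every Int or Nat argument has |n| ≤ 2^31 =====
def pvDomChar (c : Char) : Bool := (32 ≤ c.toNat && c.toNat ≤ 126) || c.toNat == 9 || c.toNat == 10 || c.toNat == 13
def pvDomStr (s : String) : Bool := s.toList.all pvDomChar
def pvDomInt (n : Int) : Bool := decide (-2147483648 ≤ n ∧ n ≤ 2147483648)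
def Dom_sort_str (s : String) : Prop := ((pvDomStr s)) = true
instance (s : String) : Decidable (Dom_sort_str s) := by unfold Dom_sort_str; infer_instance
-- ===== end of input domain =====

-- B replaces "sort all n characters, then one s.index per character" by a selection loop:
-- repeatedly take the minimum remaining character, emit its first index count-many times,
-- and drop all its copies — no sort call at all (objective: alternative algorithm).

-- ===== PORT A =====
-- A: copy s into a list, sort it, then append s.index(c) for each sorted character.
def sort_str (s : String) : List Int :=
  let ss : List Char := s.toList.foldl (fun acc c => acc ++ [c]) []
  let ss := PySem.List.sorted ss (fun c => c) false
  ss.foldl (fun idx c => idx ++ [(((PySem.List.index? s.toList c).getD 0 : Nat) : Int)]) []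
  -- s.index(c) never raises here since every c comes from s; ported as index? with getD on that domain

-- ===== PORT B =====
-- B's while loop: while chars: m = min(chars); out += [s.index(m)]*chars.count(m); chars = [c for c in chars if c != m]
def sortStrLoop (sl : List Char) (chars : List Char) (out : List Int) : List Int :=
  match chars with
  | [] => out
  | c :: cs =>
    let m := (PySem.List.min? (c :: cs) (fun x => x)).getD c
    -- min(chars) never raises here since chars is nonempty; ported as min? with getD
    let out := out ++ List.replicate (PySem.List.count (c :: cs) m)
        (((PySem.List.index? sl m).getD 0 : Nat) : Int)
    -- s.index(m) never raises since m comes from s; ported as index? with getD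
    sortStrLoop sl ((c :: cs).filter (fun x => x ≠ m)) out
termination_by chars.length
decreasing_by
  simp only [List.length_filter_lt_length_iff_exists]
  refine ⟨(PySem.List.min? (c :: cs) (fun x => x)).getD c, ?_, by simp⟩
  cases hm : PySem.List.min? (c :: cs) (fun x => x) with
  | none => simp at hm
  | some m => simpa [hm] using PySem.List.min?_mem hm

def sort_str_alt (s : String) : List Int :=
  sortStrLoop s.toList s.toList []

-- ===== PRECONDITION & SPEC =====
def Spec_sort_str (s : String) (out : List Int) : Prop := out = sort_str_alt s
instance (s : String) (out : List Int) : Decidable (Spec_sort_str s out) := by unfold Spec_sort_str; infer_instance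

-- ===== CLAIM (what is proved, stated in full; the proofs are below) =====
def Claim_equal_sort_str : Prop := ∀ (s : String), Dom_sort_str s → Spec_sort_str s (sort_str s)

-- ===== LEMMAS AND PROOFS =====

-- one selection step: sorted(l) = (count m copies of the minimum m) ++ sorted(rest)
lemma sorted_min_step (c : Char) (cs : List Char) (m : Char)
    (hm : PySem.List.min? (c :: cs) (fun x => x) = some m) :
    PySem.List.sorted (c :: cs) (fun x => x) false =
      List.replicate ((c :: cs).count m) m ++
        PySem.List.sorted ((c :: cs).filter (fun x => x ≠ m)) (fun x => x) false := by
  have hmem := PySem.List.min?_mem hm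
  have hmin : ∀ y ∈ (c :: cs), m ≤ y := by
    intro y hy; exact PySem.List.min?_isMin hm y hy
  apply PySem.List.sorted_id_eq_of_perm_of_pairwise
  · -- permutation
    have h1 : (c :: cs).filter (fun x => x = m) = List.replicate ((c :: cs).count m) m := by
      rw [List.count_eq_countP]
      induction (c :: cs) with
      | nil => simp
      | cons a t ih =>
        by_cases h : a = m
        · subst h; simp [List.replicate_succ, ih]
        · simp [h, ih]
    have h2 := List.filter_append_perm (fun x => decide (x = m)) (c :: cs)
    have h3 : (c :: cs).filter (fun x => !decide (x = m)) = (c :: cs).filter (fun x => decide (x ≠ m)) := by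
      apply List.filter_congr; intro x _; simp
    rw [h3] at h2
    refine List.Perm.trans ?_ h2
    rw [← h1]
    exact List.Perm.append_left _ (PySem.List.sorted_perm _ _ _)
  · -- pairwise ≤
    rw [List.pairwise_append]
    refine ⟨List.pairwise_replicate.mpr (Or.inr le_rfl), PySem.List.sorted_pairwise _ _, ?_⟩
    intro a ha b hb
    have ham : a = m := List.eq_of_mem_replicate ha
    have hbmem : b ∈ (c :: cs) := by
      have := (PySem.List.mem_sorted _ _ _ _).mp hb
      exact List.mem_of_mem_filter this
    exact ham ▸ hmin b hbmem

-- the selection loop computes out ++ map index (sorted l)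
lemma sortStrLoop_eq (sl : List Char) (l : List Char) (out : List Int) :
    sortStrLoop sl l out =
      out ++ (PySem.List.sorted l (fun x => x) false).map
        (fun c => (((PySem.List.index? sl c).getD 0 : Nat) : Int)) := by
  fun_induction sortStrLoop sl l out with
  | case1 => simp [PySem.List.sorted]
  | case2 acc c cs m o ih =>
    have hm : PySem.List.min? (c :: cs) (fun x => x) = some m := by
      cases h : PySem.List.min? (c :: cs) (fun x => x) with
      | none => simp at h
      | some m' =>
        have hmm : m = m' := by
          show ((PySem.List.min? (c :: cs) fun x => x).getD c) = m'
          rw [h]; rfl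
        rw [hmm]
    have ho : o = acc ++ List.replicate (PySem.List.count (c :: cs) m)
        (((PySem.List.index? sl m).getD 0 : Nat) : Int) := rfl
    rw [ih, ho, sorted_min_step c cs m hm, List.map_append, List.map_replicate,
      PySem.List.count_eq, List.append_assoc]

-- ===== VERDICT (by name: the statement is the Claim_ definition above) =====
theorem sort_str_spec : Claim_equal_sort_str := by
  intro s _
  unfold Spec_sort_str sort_str sort_str_alt
  rw [sortStrLoop_eq s.toList s.toList []]
  simp only [PySem.List.foldl_append_singleton, List.nil_append,
    PySem.List.foldl_append_singleton_eq_map]
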